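-- pv_equiv track=rewrite | github.com/NCRC-org/justdata | scripts/generate_census_tileset.py | compute_quartiles
-- ===== SOURCE A (Python) =====
-- def compute_quartiles(pct_list):
--     """Compute Q1, Q2 (median), Q3 from a sorted list of percentages."""
--     vals = sorted([p for p in pct_list if 0 <= p <= 100])
--     n = len(vals)
--     if n == 0:
--         return None
--     return {
--         'q1': vals[int(n * 0.25)],
--         'q2': vals[int(n * 0.50)],
--         'q3': vals[int(n * 0.75)]
--     }
-- ===== SOURCE B (Python) =====
-- def compute_quartiles(pct_list):
--     """Compute Q1, Q2 (median), Q3 from a list of percentages (quickselect, no full sort)."""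
--     vals = [p for p in pct_list if 0 <= p <= 100]
--     n = len(vals)
--     if n == 0:
--         return None
--
--     def select(xs, k):
--         # k-th smallest (0-based) of non-empty xs, 0 <= k < len(xs)
--         while True:
--             pivot = xs[len(xs) // 2]
--             lt = [x for x in xs if x < pivot]
--             if k < len(lt):
--                 xs = lt
--                 continue
--             eq = sum(1 for x in xs if x == pivot)
--             if k < len(lt) + eq:
--                 return pivot
--             k -= len(lt) + eq
--             xs = [x for x in xs if x > pivot]
--
--     return {
--         'q1': select(vals, n // 4),
--         'q2': select(vals, n // 2),
--         'q3': select(vals, 3 * n // 4)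
--     }
-- ===== Notes on version B (the rewrite author's own statement) =====
-- stated objective: alternative
-- what changed: Replaces sorting the whole filtered list and indexing it with an iterative three-way-partition quickselect run for each of the three fixed order-statistic indices, so no full sort is performed.
import Mathlib
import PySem

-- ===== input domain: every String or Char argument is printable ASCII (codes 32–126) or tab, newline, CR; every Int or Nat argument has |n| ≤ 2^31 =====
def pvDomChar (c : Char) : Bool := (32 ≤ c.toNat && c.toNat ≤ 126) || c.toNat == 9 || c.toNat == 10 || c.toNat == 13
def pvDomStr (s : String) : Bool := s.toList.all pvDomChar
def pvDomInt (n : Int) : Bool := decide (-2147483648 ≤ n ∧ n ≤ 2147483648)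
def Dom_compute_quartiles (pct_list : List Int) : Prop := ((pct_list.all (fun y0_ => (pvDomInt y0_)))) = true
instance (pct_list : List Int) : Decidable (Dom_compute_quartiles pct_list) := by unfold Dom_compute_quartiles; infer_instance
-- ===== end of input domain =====

-- B replaces A's full sort with a three-way-partition quickselect for the three order
-- statistics (objective: alternative algorithm, O(n) expected selections instead of a sort).

-- ===== PORT A =====
-- A sorts the filtered values and indexes at int(n*0.25), int(n*0.50), int(n*0.75);
-- for n ≤ 2^53 those float products are exact, so they are ported exactly as n/4, n/2, 3*n/4 (Nat division).
def compute_quartiles (pct_list : List Int) : Option (List (String × Int)) :=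
  let vals := PySem.List.sorted (pct_list.filter (fun p => decide (0 ≤ p) && decide (p ≤ 100))) (fun x => x) false
  let n := vals.length
  if n = 0 then none
  else some [("q1", PySem.List.pyGetD vals ((n / 4 : Nat) : Int) 0),
             ("q2", PySem.List.pyGetD vals ((n / 2 : Nat) : Int) 0),
             ("q3", PySem.List.pyGetD vals ((3 * n / 4 : Nat) : Int) 0)]

-- ===== PORT B =====
-- B's while-loop select, as the corresponding tail recursion; the `xs = []` guard only
-- makes the recursion total (B only calls it with a non-empty xs and 0 ≤ k < len xs).
def qselect (xs : List Int) (k : Nat) : Int :=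
  if hxs : xs = [] then 0
  else
    let piv := PySem.List.pyGetD xs ((xs.length / 2 : Nat) : Int) 0
    let lt := xs.filter (fun x => decide (x < piv))
    if k < lt.length then qselect lt k
    else
      let eqc := xs.countP (fun x => x == piv)
      if k < lt.length + eqc then piv
      else qselect (xs.filter (fun x => decide (piv < x))) (k - (lt.length + eqc))
termination_by xs.length
decreasing_by
  · rw [List.length_unattach, ← List.countP_eq_length_filter,
       List.countP_attach (p := fun x => decide (x < PySem.List.pyGetD xs ((xs.length / 2 : Nat) : Int) 0)) (l := xs),
       List.countP_eq_length_filter]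
    refine List.length_filter_lt_length_iff_exists.mpr
      ⟨PySem.List.pyGetD xs ((xs.length / 2 : Nat) : Int) 0, ?_, by simp⟩
    rw [PySem.List.pyGetD_natCast,
        List.getD_eq_getElem _ _ (by have := List.length_pos_iff.mpr hxs; omega)]
    exact List.getElem_mem _
  · rw [List.length_unattach, ← List.countP_eq_length_filter,
       List.countP_attach (p := fun x => decide (PySem.List.pyGetD xs ((xs.length / 2 : Nat) : Int) 0 < x)) (l := xs),
       List.countP_eq_length_filter]
    refine List.length_filter_lt_length_iff_exists.mpr
      ⟨PySem.List.pyGetD xs ((xs.length / 2 : Nat) : Int) 0, ?_, by simp⟩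
    rw [PySem.List.pyGetD_natCast,
        List.getD_eq_getElem _ _ (by have := List.length_pos_iff.mpr hxs; omega)]
    exact List.getElem_mem _

def compute_quartiles_alt (pct_list : List Int) : Option (List (String × Int)) :=
  let vals := pct_list.filter (fun p => decide (0 ≤ p) && decide (p ≤ 100))
  let n := vals.length
  if n = 0 then none
  else some [("q1", qselect vals (n / 4)),
             ("q2", qselect vals (n / 2)),
             ("q3", qselect vals (3 * n / 4))]

-- ===== PRECONDITION & SPEC =====
def Spec_compute_quartiles (pct_list : List Int) (out : Option (List (String × Int))) : Prop := out = compute_quartiles_alt pct_list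
instance (pct_list : List Int) (out : Option (List (String × Int))) : Decidable (Spec_compute_quartiles pct_list out) := by unfold Spec_compute_quartiles; infer_instance

-- ===== CLAIM (what is proved, stated in full; the proofs are below) =====
def Claim_equal_compute_quartiles : Prop := ∀ (pct_list : List Int), Dom_compute_quartiles pct_list → Spec_compute_quartiles pct_list (compute_quartiles pct_list)

-- ===== LEMMAS AND PROOFS =====

-- the equal-to-pivot block of xs is a replicate
lemma filter_eq_replicate (piv : Int) (xs : List Int) :
    xs.filter (fun x => x == piv) = List.replicate (xs.countP (fun x => x == piv)) piv := by
  rw [List.eq_replicate_iff]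
  constructor
  · simp [List.countP_eq_length_filter]
  · intro b hb
    have := List.of_mem_filter hb
    simpa using this

-- the three-way partition at piv is a permutation of xs
lemma perm_partition (piv : Int) (xs : List Int) :
    (xs.filter (fun x => decide (x < piv)) ++
      (List.replicate (xs.countP (fun x => x == piv)) piv ++
        xs.filter (fun x => decide (piv < x)))).Perm xs := by
  rw [← filter_eq_replicate]
  have h1 : (xs.filter (fun x => decide (x < piv)) ++
      xs.filter (fun x => !decide (x < piv))).Perm xs := List.filter_append_perm _ xs
  refine List.Perm.trans (List.Perm.append_left _ ?_) h1
  have h2 : ((xs.filter (fun x => !decide (x < piv))).filter (fun x => x == piv) ++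
      (xs.filter (fun x => !decide (x < piv))).filter (fun x => !(x == piv))).Perm
      (xs.filter (fun x => !decide (x < piv))) := List.filter_append_perm _ _
  refine List.Perm.trans ?_ h2
  apply List.Perm.append
  · rw [List.filter_filter]
    apply List.Perm.of_eq
    apply List.filter_congr
    intro x _
    by_cases h : x = piv <;> simp [h]
  · rw [List.filter_filter]
    apply List.Perm.of_eq
    apply List.filter_congr
    intro x _
    by_cases h : piv < x <;> simp [h] <;> omega

-- sorted(xs) splits at any pivot into sorted(<piv) ++ (= piv) ++ sorted(> piv)
lemma sorted_decomp (piv : Int) (xs : List Int) :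
    PySem.List.sorted xs (fun x => x) false =
      PySem.List.sorted (xs.filter (fun x => decide (x < piv))) (fun x => x) false
      ++ List.replicate (xs.countP (fun x => x == piv)) piv
      ++ PySem.List.sorted (xs.filter (fun x => decide (piv < x))) (fun x => x) false := by
  rw [List.append_assoc]
  apply PySem.List.sorted_id_eq_of_perm_of_pairwise
  · exact (List.Perm.trans
      (List.Perm.append ((PySem.List.sorted_perm _ _ _))
        (List.Perm.append (List.Perm.refl _) (PySem.List.sorted_perm _ _ _)))
      (perm_partition piv xs))
  · -- Pairwise (· ≤ ·) of the concatenation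
    rw [List.pairwise_append]
    refine ⟨by simpa using PySem.List.sorted_pairwise (key := fun x => (x : Int)) (xs := xs.filter (fun x => decide (x < piv))), ?_, ?_⟩
    · rw [List.pairwise_append]
      refine ⟨List.pairwise_replicate.mpr (by simp), by simpa using PySem.List.sorted_pairwise (key := fun x => (x : Int)) (xs := xs.filter (fun x => decide (piv < x))), ?_⟩
      intro a ha b hb
      have ha' : a = piv := List.eq_of_mem_replicate ha
      have hb' : piv < b := by
        have := (PySem.List.mem_sorted _ _ _ _).mp hb
        have := List.of_mem_filter this
        simpa using this
      omega
    · intro a ha b hb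
      have ha' : a < piv := by
        have := (PySem.List.mem_sorted _ _ _ _).mp ha
        have := List.of_mem_filter this
        simpa using this
      rcases List.mem_append.mp hb with hb | hb
      · have hb' : b = piv := List.eq_of_mem_replicate hb
        omega
      · have hb' : piv < b := by
          have := (PySem.List.mem_sorted _ _ _ _).mp hb
          have := List.of_mem_filter this
          simpa using this
        omega

-- quickselect computes the k-th element of the sorted list (strong induction on length)
lemma qselect_eq_aux : ∀ (n : Nat) (xs : List Int) (k : Nat), xs.length = n → k < xs.length →
    qselect xs k = (PySem.List.sorted xs (fun x => x) false).getD k 0 := by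
  intro n
  induction n using Nat.strong_induction_on with
  | _ n ih =>
  intro xs k hn hk
  have hxs : xs ≠ [] := by intro h; subst h; simp at hk
  rw [qselect]
  simp only [dif_neg hxs]
  set piv := PySem.List.pyGetD xs ((xs.length / 2 : Nat) : Int) 0 with hpivdef
  have hpiv : piv ∈ xs := by
    rw [hpivdef, PySem.List.pyGetD_natCast,
        List.getD_eq_getElem _ _ (by have := List.length_pos_iff.mpr hxs; omega)]
    exact List.getElem_mem _
  have hlt_len : (xs.filter (fun x => decide (x < piv))).length < xs.length :=
    List.length_filter_lt_length_iff_exists.mpr ⟨piv, hpiv, by simp⟩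
  have hgt_len : (xs.filter (fun x => decide (piv < x))).length < xs.length :=
    List.length_filter_lt_length_iff_exists.mpr ⟨piv, hpiv, by simp⟩
  have hsum : xs.length = (xs.filter (fun x => decide (x < piv))).length
      + xs.countP (fun x => x == piv) + (xs.filter (fun x => decide (piv < x))).length := by
    have := (perm_partition piv xs).length_eq
    simp at this
    omega
  rw [sorted_decomp piv xs]
  split_ifs with h1 h2
  · rw [ih _ (by omega) _ _ rfl h1, List.append_assoc,
        List.getD_append _ _ _ _ (by rwa [PySem.List.length_sorted])]
  · rw [List.append_assoc,
        List.getD_append_right _ _ _ _ (by rw [PySem.List.length_sorted]; omega),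
        List.getD_append _ _ _ _ (by simp only [PySem.List.length_sorted, List.length_replicate]; omega)]
    exact (List.getD_replicate _ (by simp only [PySem.List.length_sorted]; omega)).symm
  · rw [ih _ (by omega) _ _ rfl (by omega), List.append_assoc,
        List.getD_append_right _ _ _ _ (by rw [PySem.List.length_sorted]; omega),
        List.getD_append_right _ _ _ _ (by simp only [PySem.List.length_sorted, List.length_replicate]; omega)]
    congr 1
    simp only [PySem.List.length_sorted, List.length_replicate]
    omega

lemma qselect_eq (xs : List Int) (k : Nat) (hk : k < xs.length) :
    qselect xs k = (PySem.List.sorted xs (fun x => x) false).getD k 0 :=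
  qselect_eq_aux xs.length xs k rfl hk

-- ===== VERDICT (by name: the statement is the Claim_ definition above) =====
theorem compute_quartiles_spec : Claim_equal_compute_quartiles := by
  intro pct_list _
  unfold Spec_compute_quartiles compute_quartiles compute_quartiles_alt
  set vals := pct_list.filter (fun p => decide (0 ≤ p) && decide (p ≤ 100)) with hvals
  have hlen : (PySem.List.sorted vals (fun x => x) false).length = vals.length :=
    PySem.List.length_sorted _ _ _
  simp only [hlen]
  by_cases h : vals.length = 0
  · simp [h]
  · have hn : 0 < vals.length := Nat.pos_of_ne_zero h
    simp only [if_neg h]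
    rw [qselect_eq vals (vals.length / 4) (by omega),
        qselect_eq vals (vals.length / 2) (by omega),
        qselect_eq vals (3 * vals.length / 4) (by omega)]
    simp only [PySem.List.pyGetD_natCast]
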